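-- pv_equiv track=rewrite | github.com/rafailmdzdv/o2-tatneft | src/limit_parser/app/services/pw.py | _divide_card_number
-- ===== SOURCE A (Python) =====
-- def _divide_card_number(card_number: str) -> str:
--     divided_card_number = ''
--     divide_index = 4
--     for index, char in enumerate(card_number, start=1):
--         divided_card_number += char
--         if not index % divide_index:
--             divided_card_number += ' '
--             divide_index += 4
--     return divided_card_number
-- ===== SOURCE B (Python) =====
-- def _divide_card_number(card_number: str) -> str:
--     parts = []
--     rest = card_number
--     while rest:
--         chunk, rest = rest[:4], rest[4:]
--         parts.append(chunk + ' ' if len(chunk) == 4 else chunk)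
--     return ''.join(parts)
-- ===== Notes on version B (the rewrite author's own statement) =====
-- stated objective: simpler
-- what changed: B slices the string into 4-character chunks (peeling the head chunk off a shrinking suffix) and appends a space after every full chunk, instead of A's per-character loop with an enumerate counter and a growing divide_index threshold.
import Mathlib
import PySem

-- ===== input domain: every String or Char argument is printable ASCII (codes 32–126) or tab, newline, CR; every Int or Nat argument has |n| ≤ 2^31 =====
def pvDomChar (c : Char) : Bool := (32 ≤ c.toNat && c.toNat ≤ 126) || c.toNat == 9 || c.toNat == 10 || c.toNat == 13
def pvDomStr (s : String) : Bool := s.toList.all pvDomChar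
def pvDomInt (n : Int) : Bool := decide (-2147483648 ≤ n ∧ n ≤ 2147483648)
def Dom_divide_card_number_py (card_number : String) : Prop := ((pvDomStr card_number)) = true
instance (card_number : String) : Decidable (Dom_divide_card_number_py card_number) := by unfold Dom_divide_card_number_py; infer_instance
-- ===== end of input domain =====

-- B chunks the string by 4 and appends a space after each full chunk; same return value as A, stated for simplicity, not speed.
-- ===== PORT A =====
-- Python strings are handled on List Char (PySem convention); '+=' on the accumulator is '++ [·]'.
def divide_card_number_py (card_number : String) : String :=
  let st := (PySem.List.enumerate card_number.toList 1).foldl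
    (fun (st : List Char × Int) (p : Int × Char) =>
      let acc := st.1 ++ [p.2]
      if PySem.Int.mod p.1 st.2 = 0 then (acc ++ [' '], st.2 + 4) else (acc, st.2))
    ([], 4)
  String.ofList st.1

-- ===== PORT B =====
-- rest[:4] / rest[4:] with literal nonnegative bounds are exactly List.take 4 / List.drop 4 (PySem.List.slice_to_natCast / slice_from_natCast).
def pvChunksB (cs : List Char) : List (List Char) :=
  match cs with
  | [] => []
  | c :: tl =>
    let chunk := (c :: tl).take 4
    let rest := (c :: tl).drop 4
    (if chunk.length = 4 then chunk ++ [' '] else chunk) :: pvChunksB rest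
termination_by cs.length
decreasing_by simp

def divide_card_number_py_alt (card_number : String) : String :=
  String.ofList (pvChunksB card_number.toList).flatten

-- ===== PRECONDITION & SPEC =====
def Spec_divide_card_number_py (card_number : String) (out : String) : Prop := out = divide_card_number_py_alt card_number
instance (card_number : String) (out : String) : Decidable (Spec_divide_card_number_py card_number out) := by unfold Spec_divide_card_number_py; infer_instance

-- ===== CLAIM (what is proved, stated in full; the proofs are below) =====
def Claim_equal_divide_card_number_py : Prop := ∀ (card_number : String), Dom_divide_card_number_py card_number → Spec_divide_card_number_py card_number (divide_card_number_py card_number)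

-- ===== LEMMAS AND PROOFS =====

-- ===== VERDICT (by name: the statement is the Claim_ definition above) =====
-- canonical per-character form: k chars remain until the next space (k counts 4,3,2,1, then a space and reset)
def pvSpecRun : List Char → Nat → List Char
  | [], _ => []
  | c :: cs, k => if k ≤ 1 then c :: ' ' :: pvSpecRun cs 4 else c :: pvSpecRun cs (k - 1)

theorem pvChunksB_eq_spec (cs : List Char) : (pvChunksB cs).flatten = pvSpecRun cs 4 := by
  match cs with
  | [] => simp [pvChunksB, pvSpecRun]
  | [a] => simp [pvChunksB, pvSpecRun]
  | [a, b] => simp [pvChunksB, pvSpecRun]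
  | [a, b, c] => simp [pvChunksB, pvSpecRun]
  | a :: b :: c :: d :: rest =>
    have ih := pvChunksB_eq_spec rest
    simp [pvChunksB, pvSpecRun, ih]
termination_by cs.length

theorem pvFoldA_eq_spec (cs : List Char) (i d : Int) (acc : List Char)
    (h0 : 0 < i) (h1 : i ≤ d) (h2 : d < i + 4) :
    ((PySem.List.enumerate cs i).foldl
      (fun (st : List Char × Int) (p : Int × Char) =>
        let acc := st.1 ++ [p.2]
        if PySem.Int.mod p.1 st.2 = 0 then (acc ++ [' '], st.2 + 4) else (acc, st.2))
      (acc, d)).1 = acc ++ pvSpecRun cs (d - i + 1).toNat := by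
  induction cs generalizing i d acc with
  | nil => simp [PySem.List.enumerate_nil, pvSpecRun]
  | cons c cs ih =>
    rw [PySem.List.enumerate_cons, List.foldl_cons]
    by_cases hid : i = d
    · have hmod : PySem.Int.mod i d = 0 := by
        rw [PySem.Int.mod_eq_zero_iff_dvd]; exact hid ▸ dvd_refl i
      have hk1 : (d - i + 1).toNat = 1 := by omega
      have hk4 : (d + 4 - (i + 1) + 1).toNat = 4 := by omega
      simp only [hmod, if_pos]
      rw [ih (i + 1) (d + 4) (acc ++ [c] ++ [' ']) (by omega) (by omega) (by omega)]
      rw [hk1, hk4]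
      simp [pvSpecRun]
    · have hlt : i < d := lt_of_le_of_ne h1 hid
      have hmod : PySem.Int.mod i d ≠ 0 := by
        intro h
        rw [PySem.Int.mod_eq_zero_iff_dvd] at h
        have := Int.le_of_dvd h0 h
        omega
      simp only [hmod, ite_false]
      rw [ih (i + 1) d (acc ++ [c]) (by omega) (by omega) (by omega)]
      have hk : (d - i + 1).toNat = (d - (i + 1) + 1).toNat + 1 := by omega
      have hge : ¬ ((d - (i + 1) + 1).toNat + 1 ≤ 1) := by omega
      rw [hk]
      simp [pvSpecRun, hge]

theorem divide_card_number_py_spec : Claim_equal_divide_card_number_py := by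
  intro s _
  unfold Spec_divide_card_number_py divide_card_number_py divide_card_number_py_alt
  rw [pvChunksB_eq_spec]
  have := pvFoldA_eq_spec s.toList 1 4 [] (by omega) (by omega) (by omega)
  simp at this ⊢
  rw [this]
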